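-- pv_equiv track=rewrite | github.com/ralay1/ECE140A | Challenge 1/challenge_python_review.py | filter_strings
-- ===== SOURCE A (Python) =====
-- def filter_strings(str_list):
--     '''
--     Takes in a list of strings as its input and returns a new list with all the strings that contain at
--     least one vowel (a, e, i, o, u) and are at least 5 characters long.
--     '''
--     output = list()
--     flag = False # flag used to determine passing or failing the conditions
--     vowel_list = ['a', 'e', 'i', 'o', 'u']
--     for word in str_list:
--         if len(word) < 5: # check that length >= 5
--             continue
--         for v in vowel_list:
--             if v in word:
--                 flag = True
--         if flag == True: # if vowel in word append to output list
--             output.append(word)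
--         flag = False
--     return output
-- ===== SOURCE B (Python) =====
-- VOWELS = {'a', 'e', 'i', 'o', 'u'}
--
-- def filter_strings(str_list):
--     return [w for w in str_list if len(w) >= 5 and any(c in VOWELS for c in w)]
-- ===== Notes on version B (the rewrite author's own statement) =====
-- stated objective: idiomatic
-- what changed: Replaces the flag-carrying loop that scans the word once per vowel (5 substring searches per word) with a single list comprehension that scans each word's characters once, testing set membership.
import Mathlib
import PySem

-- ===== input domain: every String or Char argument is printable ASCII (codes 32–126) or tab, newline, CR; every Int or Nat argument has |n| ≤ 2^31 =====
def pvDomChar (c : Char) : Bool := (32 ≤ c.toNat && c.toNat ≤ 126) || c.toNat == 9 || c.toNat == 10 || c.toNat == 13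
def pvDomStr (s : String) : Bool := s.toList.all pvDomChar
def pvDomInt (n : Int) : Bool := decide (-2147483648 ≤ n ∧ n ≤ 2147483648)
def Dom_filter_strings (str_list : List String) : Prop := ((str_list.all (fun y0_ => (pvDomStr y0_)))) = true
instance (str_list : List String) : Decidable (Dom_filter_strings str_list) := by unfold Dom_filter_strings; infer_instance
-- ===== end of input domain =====

-- B replaces A's per-vowel substring scans and carried flag with one
-- comprehension testing each character against a vowel set (idiomatic, same cost).
-- ===== PORT A =====
def filter_strings (str_list : List String) : List String :=
  (str_list.foldl (fun (st : List String × Bool) word =>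
    if PySem.Str.len word < 5 then st
    else
      let flag := ["a", "e", "i", "o", "u"].foldl
        (fun f v => if PySem.Str.isIn v word then true else f) st.2
      let output := if flag = true then st.1 ++ [word] else st.1
      (output, false)) ([], false)).1

-- ===== PORT B =====
def pvVowels : List Char := ['a', 'e', 'i', 'o', 'u']

def filter_strings_alt (str_list : List String) : List String :=
  str_list.filter (fun w =>
    decide (5 ≤ PySem.Str.len w) && w.toList.any (fun c => pvVowels.contains c))

-- ===== PRECONDITION & SPEC =====
def Spec_filter_strings (str_list : List String) (out : List String) : Prop := out = filter_strings_alt str_list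
instance (str_list : List String) (out : List String) : Decidable (Spec_filter_strings str_list out) := by unfold Spec_filter_strings; infer_instance

-- ===== CLAIM (what is proved, stated in full; the proofs are below) =====
def Claim_equal_filter_strings : Prop := ∀ (str_list : List String), Dom_filter_strings str_list → Spec_filter_strings str_list (filter_strings str_list)

-- ===== LEMMAS AND PROOFS =====

-- the loop body of A's fold, named for the proofs (definitionally the port's lambda)
def pvStep (st : List String × Bool) (word : String) : List String × Bool :=
  if PySem.Str.len word < 5 then st
  else
    let flag := ["a", "e", "i", "o", "u"].foldl
      (fun f v => if PySem.Str.isIn v word then true else f) st.2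
    let output := if flag = true then st.1 ++ [word] else st.1
    (output, false)

-- B's per-word predicate, named for the proofs
def pvKeep (w : String) : Bool :=
  decide (5 ≤ PySem.Str.len w) && w.toList.any (fun c => pvVowels.contains c)

lemma char_isIn (c : Char) (s : List Char) : PySem.Chars.isIn [c] s = s.contains c := by
  by_cases h : c ∈ s
  · have := (PySem.Chars.isIn_iff_infix (sub := [c]) (s := s)).mpr
      ((List.singleton_infix_iff c s).mpr h)
    simp [this, h]
  · have := (PySem.Chars.isIn_eq_false_iff (sub := [c]) (s := s)).mpr
      (fun hin => h ((List.singleton_infix_iff c s).mp hin))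
    simp [this, h]

-- the inner vowel loop started from flag = false detects 'some character is a vowel'
lemma inner_flag_eq (word : String) :
    (["a", "e", "i", "o", "u"].foldl
      (fun f v => if PySem.Str.isIn v word then true else f) false)
    = word.toList.any (fun c => pvVowels.contains c) := by
  simp only [List.foldl_cons, List.foldl_nil, PySem.Str.isIn_eq]
  have ha : ("a" : String).toList = ['a'] := by decide
  have he : ("e" : String).toList = ['e'] := by decide
  have hi : ("i" : String).toList = ['i'] := by decide
  have ho : ("o" : String).toList = ['o'] := by decide
  have hu : ("u" : String).toList = ['u'] := by decide
  simp only [ha, he, hi, ho, hu, char_isIn]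
  rw [Bool.eq_iff_iff]
  simp only [List.any_eq_true, pvVowels, List.contains_iff_mem, List.mem_cons,
    List.not_mem_nil, or_false]
  constructor
  · intro h
    split_ifs at h <;> exact ⟨_, by assumption, by simp⟩
  · rintro ⟨x, hx, rfl | rfl | rfl | rfl | rfl⟩ <;> simp [hx]

lemma foldl_filter_inv (l : List String) (acc : List String) :
    (l.foldl pvStep (acc, false)).1 = acc ++ l.filter pvKeep := by
  induction l generalizing acc with
  | nil => simp
  | cons w l ih =>
    rw [List.foldl_cons, List.filter_cons]
    by_cases hlen : PySem.Str.len w < 5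
    · have hstep : pvStep (acc, false) w = (acc, false) := by
        unfold pvStep; rw [if_pos hlen]
      have hkeep : pvKeep w = false := by
        unfold pvKeep
        rw [decide_eq_false (by omega : ¬ (5 ≤ PySem.Str.len w)), Bool.false_and]
      rw [hstep, ih, hkeep]
      rfl
    · have h5 : 5 ≤ PySem.Str.len w := by omega
      by_cases hv : w.toList.any (fun c => pvVowels.contains c) = true
      · have hstep : pvStep (acc, false) w = (acc ++ [w], false) := by
          unfold pvStep
          rw [if_neg hlen, inner_flag_eq, hv]
          rfl
        have hkeep : pvKeep w = true := by
          unfold pvKeep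
          rw [hv, decide_eq_true h5, Bool.true_and]
        rw [hstep, ih, hkeep, List.append_assoc, List.singleton_append]
        rfl
      · have hv' : (w.toList.any (fun c => pvVowels.contains c)) = false :=
          Bool.not_eq_true _ ▸ eq_false_of_ne_true hv
        have hstep : pvStep (acc, false) w = (acc, false) := by
          unfold pvStep
          rw [if_neg hlen, inner_flag_eq, hv']
          rfl
        have hkeep : pvKeep w = false := by
          unfold pvKeep
          rw [hv', Bool.and_false]
        rw [hstep, ih, hkeep]
        rfl

-- ===== VERDICT (by name: the statement is the Claim_ definition above) =====
theorem filter_strings_spec : Claim_equal_filter_strings := by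
  intro str_list _
  show filter_strings str_list = filter_strings_alt str_list
  have hA : filter_strings str_list = (str_list.foldl pvStep ([], false)).1 := rfl
  have hB : filter_strings_alt str_list = str_list.filter pvKeep := rfl
  rw [hA, hB, foldl_filter_inv, List.nil_append]
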